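-- pv_equiv track=rewrite | github.com/k4rkusha74/oaip_roguelike | draw_map.py | get_view_symbol
-- ===== SOURCE A (Python) =====
-- def get_view_symbol(player_x, player_y, radius, max_x, max_y):
--
--     visible = set()  # Множество для хранения видимых клеток
--
--     # Перебираем все клетки в квадрате radius x radius вокруг игрока
--     for dy in range(-radius, radius + 1):
--         for dx in range(-radius, radius + 1):
--             # Вычисляем координаты клетки
--             x = player_x + dx
--             y = player_y + dy
--
--             # Проверяем, что клетка в пределах карты
--             if 0 <= x < max_x and 0 <= y < max_y:
--                 visible.add((x, y))  # Добавляем в видимые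
--
--     return visible
-- ===== SOURCE B (Python) =====
-- def get_view_symbol(player_x, player_y, radius, max_x, max_y):
--     # The visible cells are exactly the rectangle [xlo,xhi) x [ylo,yhi):
--     # enumerate it with a single flat index decoded by divmod.
--     xlo = max(0, player_x - radius)
--     xhi = min(max_x, player_x + radius + 1)
--     ylo = max(0, player_y - radius)
--     yhi = min(max_y, player_y + radius + 1)
--     w = xhi - xlo
--     h = yhi - ylo
--     if w <= 0 or h <= 0:
--         return set()
--     return {(xlo + k % w, ylo + k // w) for k in range(w * h)}
-- ===== Notes on version B (the rewrite author's own statement) =====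
-- stated objective: alternative
-- what changed: B computes the clipped rectangle [xlo,xhi)x[ylo,yhi) once and enumerates it with ONE flat loop over k in range(w*h), decoding each cell as (xlo + k % w, ylo + k // w) via divmod, instead of A's nested scan of the whole (2r+1)^2 square with a per-cell bounds test.
import Mathlib
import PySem

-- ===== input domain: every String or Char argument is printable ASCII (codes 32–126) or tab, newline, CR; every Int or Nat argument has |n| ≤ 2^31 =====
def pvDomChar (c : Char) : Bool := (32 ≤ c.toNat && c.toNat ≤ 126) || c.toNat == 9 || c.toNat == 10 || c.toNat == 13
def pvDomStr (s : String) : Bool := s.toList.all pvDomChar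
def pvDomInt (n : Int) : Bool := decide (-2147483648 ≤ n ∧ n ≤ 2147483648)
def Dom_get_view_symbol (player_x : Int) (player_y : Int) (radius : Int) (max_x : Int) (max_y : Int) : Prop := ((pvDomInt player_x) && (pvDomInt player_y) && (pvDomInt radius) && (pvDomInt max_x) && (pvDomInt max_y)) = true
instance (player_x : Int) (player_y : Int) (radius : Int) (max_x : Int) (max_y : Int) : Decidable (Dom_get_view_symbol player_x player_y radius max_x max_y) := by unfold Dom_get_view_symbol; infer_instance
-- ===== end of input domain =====

-- B computes the clipped rectangle once and enumerates it with a single flat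
-- divmod-decoded loop, instead of A's nested scan of the square with a per-cell
-- bounds test; same returned set.

-- ===== PORT A =====
-- scan the full (2r+1)×(2r+1) square around the player, keep in-bounds cells
def get_view_symbol (player_x : Int) (player_y : Int) (radius : Int) (max_x : Int) (max_y : Int) : List (Int × Int) :=
  (PySem.List.pyRange (-radius) (radius + 1) 1).foldl
    (fun visible dy =>
      (PySem.List.pyRange (-radius) (radius + 1) 1).foldl
        (fun visible dx =>
          if (0 ≤ player_x + dx ∧ player_x + dx < max_x) ∧
             (0 ≤ player_y + dy ∧ player_y + dy < max_y) then
            PySem.Set.add visible (player_x + dx, player_y + dy)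
          else visible)
        visible)
    (PySem.Set.empty : PySem.Set (Int × Int))

-- ===== PORT B =====
-- clip the window, then one flat loop over k ∈ [0, w*h) decoded by divmod
def get_view_symbol_alt (player_x : Int) (player_y : Int) (radius : Int) (max_x : Int) (max_y : Int) : List (Int × Int) :=
  let xlo := max 0 (player_x - radius)
  let xhi := min max_x (player_x + radius + 1)
  let ylo := max 0 (player_y - radius)
  let yhi := min max_y (player_y + radius + 1)
  let w := xhi - xlo
  let h := yhi - ylo
  if w ≤ 0 ∨ h ≤ 0 then (PySem.Set.empty : PySem.Set (Int × Int))
  else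
    (PySem.List.pyRange 0 (w * h) 1).foldl
      (fun visible k =>
        PySem.Set.add visible (xlo + PySem.Int.mod k w, ylo + PySem.Int.floordiv k w))
      (PySem.Set.empty : PySem.Set (Int × Int))

-- ===== PRECONDITION & SPEC =====
def Spec_get_view_symbol (player_x : Int) (player_y : Int) (radius : Int) (max_x : Int) (max_y : Int) (out : List (Int × Int)) : Prop := out = get_view_symbol_alt player_x player_y radius max_x max_y
instance (player_x : Int) (player_y : Int) (radius : Int) (max_x : Int) (max_y : Int) (out : List (Int × Int)) : Decidable (Spec_get_view_symbol player_x player_y radius max_x max_y out) := by unfold Spec_get_view_symbol; infer_instance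

-- ===== CLAIM =====
def Claim_equal_get_view_symbol : Prop := ∀ (player_x : Int) (player_y : Int) (radius : Int) (max_x : Int) (max_y : Int), Dom_get_view_symbol player_x player_y radius max_x max_y → Spec_get_view_symbol player_x player_y radius max_x max_y (get_view_symbol player_x player_y radius max_x max_y)

-- ===== LEMMAS AND PROOFS =====

-- folding a function that ignores its second argument leaves the state unchanged
theorem pvFoldlSkip {σ : Type} (l : List Int) (s : σ) :
    l.foldl (fun v (_ : Int) => v) s = s := by
  induction l generalizing s <;> simp [*]

-- reindexing: a fold over range(a,b) of f(c+i) is a fold over range(c+a,c+b) of f(i)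
theorem pvFoldlShiftAux {σ : Type} (f : σ → Int → σ) (c b : Int) :
    ∀ (n : Nat) (a : Int), (b - a).toNat = n → ∀ (s : σ),
      (PySem.List.pyRange a b 1).foldl (fun v i => f v (c + i)) s
        = (PySem.List.pyRange (c + a) (c + b) 1).foldl f s := by
  intro n
  induction n with
  | zero =>
      intro a h s
      rw [PySem.List.pyRange_one_eq_nil (by omega), PySem.List.pyRange_one_eq_nil (by omega)]
      rfl
  | succ n ih =>
      intro a h s
      rw [PySem.List.pyRange_one_cons (by omega : a < b),
          PySem.List.pyRange_one_cons (by omega : c + a < c + b)]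
      simp only [List.foldl_cons]
      rw [show c + a + 1 = c + (a + 1) by ring]
      exact ih (a + 1) (by omega) _

theorem pvFoldlShift {σ : Type} (f : σ → Int → σ) (c a b : Int) (s : σ) :
    (PySem.List.pyRange a b 1).foldl (fun v i => f v (c + i)) s
      = (PySem.List.pyRange (c + a) (c + b) 1).foldl f s :=
  pvFoldlShiftAux f c b (b - a).toNat a rfl s

-- clipping: a guarded fold over range(a,b) equals the plain fold over the clipped range
theorem pvFoldlClipAux {σ : Type} (f : σ → Int → σ) (lo hi b : Int) :
    ∀ (n : Nat) (a : Int), (b - a).toNat = n → ∀ (s : σ),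
      (PySem.List.pyRange a b 1).foldl (fun v i => if lo ≤ i ∧ i < hi then f v i else v) s
        = (PySem.List.pyRange (max a lo) (min b hi) 1).foldl f s := by
  intro n
  induction n with
  | zero =>
      intro a h s
      rw [PySem.List.pyRange_one_eq_nil (by omega), PySem.List.pyRange_one_eq_nil (by omega)]
      rfl
  | succ n ih =>
      intro a h s
      rw [PySem.List.pyRange_one_cons (by omega : a < b)]
      simp only [List.foldl_cons]
      by_cases hp : lo ≤ a ∧ a < hi
      · rw [if_pos hp, ih (a + 1) (by omega),
            show max (a + 1) lo = a + 1 by omega,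
            show max a lo = a by omega,
            PySem.List.pyRange_one_cons (by omega : a < min b hi)]
        simp only [List.foldl_cons]
      · rw [if_neg hp, ih (a + 1) (by omega)]
        by_cases hlo : a < lo
        · rw [show max a lo = max (a + 1) lo by omega]
        · rw [PySem.List.pyRange_one_eq_nil (by omega),
              PySem.List.pyRange_one_eq_nil (by omega)]

theorem pvFoldlClip {σ : Type} (f : σ → Int → σ) (lo hi a b : Int) (s : σ) :
    (PySem.List.pyRange a b 1).foldl (fun v i => if lo ≤ i ∧ i < hi then f v i else v) s
      = (PySem.List.pyRange (max a lo) (min b hi) 1).foldl f s :=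
  pvFoldlClipAux f lo hi b (b - a).toNat a rfl s

-- the clipped inner row fold, shared shape of both sides after rewriting
def pvRow (player_x radius max_x : Int) (y : Int) (visible : PySem.Set (Int × Int)) : PySem.Set (Int × Int) :=
  (PySem.List.pyRange (max 0 (player_x - radius)) (min max_x (player_x + radius + 1)) 1).foldl
    (fun visible x => PySem.Set.add visible (x, y)) visible

-- A's inner loop at a fixed dy equals the guarded clipped row at y = player_y + dy
theorem pvInner (player_x radius max_x max_y : Int) (y : Int) (visible : PySem.Set (Int × Int)) :
    (PySem.List.pyRange (-radius) (radius + 1) 1).foldl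
      (fun visible dx =>
        if (0 ≤ player_x + dx ∧ player_x + dx < max_x) ∧ (0 ≤ y ∧ y < max_y) then
          PySem.Set.add visible (player_x + dx, y)
        else visible)
      visible
    = if 0 ≤ y ∧ y < max_y then pvRow player_x radius max_x y visible else visible := by
  by_cases hy : 0 ≤ y ∧ y < max_y
  · rw [if_pos hy]
    have hbody : (fun (v : PySem.Set (Int × Int)) dx =>
        if (0 ≤ player_x + dx ∧ player_x + dx < max_x) ∧ (0 ≤ y ∧ y < max_y) then
          PySem.Set.add v (player_x + dx, y)
        else v)
      = (fun v dx =>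
          (fun (v : PySem.Set (Int × Int)) x =>
            if 0 ≤ x ∧ x < max_x then PySem.Set.add v (x, y) else v) v (player_x + dx)) := by
      funext v dx
      simp only [hy, and_true]
    rw [hbody,
        pvFoldlShift (fun (v : PySem.Set (Int × Int)) x =>
          if 0 ≤ x ∧ x < max_x then PySem.Set.add v (x, y) else v) player_x (-radius) (radius + 1),
        pvFoldlClip (fun (v : PySem.Set (Int × Int)) x => PySem.Set.add v (x, y)) 0 max_x]
    rw [show player_x + -radius = player_x - radius by ring,
        show player_x + (radius + 1) = player_x + radius + 1 by ring,
        max_comm (player_x - radius) 0, min_comm (player_x + radius + 1) max_x]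
    rfl
  · rw [if_neg hy]
    have hbody : (fun (v : PySem.Set (Int × Int)) dx =>
        if (0 ≤ player_x + dx ∧ player_x + dx < max_x) ∧ (0 ≤ y ∧ y < max_y) then
          PySem.Set.add v (player_x + dx, y)
        else v)
      = (fun (v : PySem.Set (Int × Int)) (_ : Int) => v) := by
      funext v dx
      rw [if_neg (by tauto)]
    rw [hbody, pvFoldlSkip]

-- the fold over a w-wide block of flat indices [j*w, (j+1)*w) equals the row fold for row j
theorem pvBlock {σ : Type} (g : σ → Int → Int → σ) (w : Int) (hw : 0 < w) (j : Int) (s : σ) :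
    (PySem.List.pyRange (j * w) ((j + 1) * w) 1).foldl
      (fun v k => g v (PySem.Int.floordiv k w) (PySem.Int.mod k w)) s
      = (PySem.List.pyRange 0 w 1).foldl (fun v i => g v j i) s := by
  have := pvFoldlShift (fun (v : σ) k => g v (PySem.Int.floordiv k w) (PySem.Int.mod k w))
    (j * w) 0 w s
  rw [show j * w + 0 = j * w by ring, show j * w + w = (j + 1) * w by ring] at this
  rw [← this]
  apply PySem.List.foldl_congr_mem
  intro v i hi
  rw [PySem.List.mem_pyRange_one] at hi
  have hdiv : PySem.Int.floordiv (j * w + i) w = j := by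
    rw [PySem.Int.floordiv_eq_iff_of_pos hw]
    constructor <;> nlinarith
  have hmod : PySem.Int.mod (j * w + i) w = i := by
    have := PySem.Int.floordiv_mul_add_mod (j * w + i) w
    rw [hdiv] at this
    omega
  rw [hdiv, hmod]

-- flattening: one loop over [0, h*w) with divmod decoding equals h nested row loops
theorem pvFlatAux {σ : Type} (g : σ → Int → Int → σ) (w : Int) (hw : 0 < w) :
    ∀ (n : Nat) (s : σ),
      (PySem.List.pyRange 0 ((n : Int) * w) 1).foldl
        (fun v k => g v (PySem.Int.floordiv k w) (PySem.Int.mod k w)) s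
      = (PySem.List.pyRange 0 (n : Int) 1).foldl
          (fun v j => (PySem.List.pyRange 0 w 1).foldl (fun v i => g v j i) v) s := by
  intro n
  induction n with
  | zero =>
      intro s
      rw [show ((0:Nat):Int) * w = 0 by ring, show ((0:Nat):Int) = 0 by simp,
          PySem.List.pyRange_one_eq_nil (le_refl (0:Int))]
      rfl
  | succ n ih =>
      intro s
      have h1 : ((n + 1 : Nat) : Int) * w = (n : Int) * w + w := by push_cast; ring
      rw [h1,
          PySem.List.pyRange_one_append 0 ((n : Int) * w) ((n : Int) * w + w)
            (by positivity) (by omega),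
          List.foldl_append, ih,
          show ((n:Nat):Int) * w + w = (((n:Nat):Int) + 1) * w by ring,
          pvBlock g w hw,
          show ((n + 1 : Nat) : Int) = (n : Int) + 1 by push_cast; ring,
          PySem.List.pyRange_one_succ_right (by positivity)]
      simp [List.foldl_append]

theorem pvFlat {σ : Type} (g : σ → Int → Int → σ) (w h : Int) (hw : 0 < w) (hh : 0 ≤ h)
    (s : σ) :
    (PySem.List.pyRange 0 (w * h) 1).foldl
      (fun v k => g v (PySem.Int.floordiv k w) (PySem.Int.mod k w)) s
      = (PySem.List.pyRange 0 h 1).foldl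
          (fun v j => (PySem.List.pyRange 0 w 1).foldl (fun v i => g v j i) v) s := by
  have hcast : ((h.toNat : Nat) : Int) = h := Int.toNat_of_nonneg hh
  have := pvFlatAux g w hw h.toNat s
  rw [hcast] at this
  rw [show w * h = h * w by ring]
  exact this

-- ===== VERDICT =====
theorem get_view_symbol_spec : Claim_equal_get_view_symbol := by
  intro px py r mx my _
  unfold Spec_get_view_symbol get_view_symbol get_view_symbol_alt
  -- reduce A to the clipped nested fold
  have houter : (fun (visible : PySem.Set (Int × Int)) dy =>
      (PySem.List.pyRange (-r) (r + 1) 1).foldl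
        (fun visible dx =>
          if (0 ≤ px + dx ∧ px + dx < mx) ∧ (0 ≤ py + dy ∧ py + dy < my) then
            PySem.Set.add visible (px + dx, py + dy)
          else visible)
        visible)
    = (fun visible dy =>
        (fun (v : PySem.Set (Int × Int)) y =>
          if 0 ≤ y ∧ y < my then pvRow px r mx y v else v) visible (py + dy)) := by
    funext visible dy
    exact pvInner px r mx my (py + dy) visible
  rw [houter,
      pvFoldlShift (fun (v : PySem.Set (Int × Int)) y =>
        if 0 ≤ y ∧ y < my then pvRow px r mx y v else v) py (-r) (r + 1),
      pvFoldlClip (fun (v : PySem.Set (Int × Int)) y => pvRow px r mx y v) 0 my]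
  rw [show py + -r = py - r by ring, show py + (r + 1) = py + r + 1 by ring,
      max_comm (py - r) 0, min_comm (py + r + 1) my]
  -- abbreviations matching B
  set xlo := max 0 (px - r) with hxlo
  set xhi := min mx (px + r + 1) with hxhi
  set ylo := max 0 (py - r) with hylo
  set yhi := min my (py + r + 1) with hyhi
  by_cases hdeg : xhi - xlo ≤ 0 ∨ yhi - ylo ≤ 0
  · -- degenerate window: both sides are the empty set
    simp only [if_pos hdeg]
    rcases hdeg with hx | hy
    · have hrow : (fun (v : PySem.Set (Int × Int)) y => pvRow px r mx y v)
          = (fun (v : PySem.Set (Int × Int)) (_ : Int) => v) := by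
        funext v y
        unfold pvRow
        rw [← hxlo, ← hxhi, PySem.List.pyRange_one_eq_nil (by omega)]
        rfl
      rw [hrow, pvFoldlSkip]
    · rw [PySem.List.pyRange_one_eq_nil (by omega : yhi ≤ ylo)]
      rfl
  · rw [if_neg hdeg]
    -- flatten B's loop and shift both coordinates
    rw [pvFlat (fun (v : PySem.Set (Int × Int)) j i => PySem.Set.add v (xlo + i, ylo + j))
          (xhi - xlo) (yhi - ylo) (by omega) (by omega)]
    have hrow : (fun (v : PySem.Set (Int × Int)) j =>
        (PySem.List.pyRange 0 (xhi - xlo) 1).foldl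
          (fun v i => PySem.Set.add v (xlo + i, ylo + j)) v)
      = (fun (v : PySem.Set (Int × Int)) j =>
          (fun (v : PySem.Set (Int × Int)) y => pvRow px r mx y v) v (ylo + j)) := by
      funext v j
      have := pvFoldlShift (fun (v : PySem.Set (Int × Int)) x =>
          PySem.Set.add v (x, ylo + j)) xlo 0 (xhi - xlo) v
      rw [show xlo + 0 = xlo by ring, show xlo + (xhi - xlo) = xhi by ring] at this
      show _ = pvRow px r mx (ylo + j) v
      unfold pvRow
      rw [← hxlo, ← hxhi]
      exact this
    rw [hrow,
        pvFoldlShift (fun (v : PySem.Set (Int × Int)) y => pvRow px r mx y v) ylo 0 (yhi - ylo)]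
    rw [show ylo + 0 = ylo by ring, show ylo + (yhi - ylo) = yhi by ring]
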